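-- pv_equiv track=rewrite | github.com/WIPACrepo/wipac-dev-py-setup-action | augment_readme.py | remove_section
-- ===== SOURCE A (Python) =====
-- from typing import Literal
--
-- def remove_section(
--     lines: list[str], section_start: str, section_end: str
-- ) -> tuple[list[str], list[str]]:
--     """Return the lines before and after the section.
--
--     Only the first occurrence of the section is considered.
--     """
--     before, after = [], []
--     current_mode: Literal["before", "in_section", "after"] = "before"
--
--     for line in lines:
--         if current_mode == "before":
--             if line.strip() == section_start:  # beginning of section
--                 current_mode = "in_section"
--             else:
--                 before.append(line)
--         elif current_mode == "in_section":
--             if line.strip() == section_end:  # end of section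
--                 current_mode = "after"
--             else:
--                 pass  # don't keep lines, aka strip
--         elif current_mode == "after":
--             after.append(line)
--         else:
--             raise ValueError(f"unknown situation: {current_mode=}, {line=}")
--
--     return before, after
-- ===== SOURCE B (Python) =====
-- def remove_section(lines, section_start, section_end):
--     """Return the lines before and after the section (index-and-slice version)."""
--     i = next((k for k, line in enumerate(lines) if line.strip() == section_start), None)
--     if i is None:
--         return lines[:], []
--     before = lines[:i]
--     j = next((k for k in range(i + 1, len(lines)) if lines[k].strip() == section_end), None)
--     if j is None:
--         return before, []
--     return before, lines[j + 1:]
-- ===== Notes on version B (the rewrite author's own statement) =====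
-- stated objective: simpler
-- what changed: Replaced A's three-state accumulator loop with two index scans (find section start, then section end) and slicing the input list for before/after.
import Mathlib
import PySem

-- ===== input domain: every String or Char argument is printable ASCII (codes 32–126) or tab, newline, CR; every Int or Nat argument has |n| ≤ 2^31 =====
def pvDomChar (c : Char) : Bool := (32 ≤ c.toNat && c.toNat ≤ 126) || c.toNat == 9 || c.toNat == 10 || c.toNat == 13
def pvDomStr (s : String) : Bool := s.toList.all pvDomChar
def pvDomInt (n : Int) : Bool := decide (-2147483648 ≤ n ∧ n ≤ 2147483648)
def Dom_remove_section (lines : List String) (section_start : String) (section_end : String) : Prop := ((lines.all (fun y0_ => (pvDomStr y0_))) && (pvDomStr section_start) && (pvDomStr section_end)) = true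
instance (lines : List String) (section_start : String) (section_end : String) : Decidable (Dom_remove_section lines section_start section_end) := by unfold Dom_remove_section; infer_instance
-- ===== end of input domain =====

-- B replaces A's three-state accumulator loop by two index scans plus slices (objective: simpler).

-- ===== PORT A =====
-- A's loop state: (before, after, mode) with mode 0="before", 1="in_section", 2="after".
def pvStepA (section_start : String) (section_end : String)
    (s : List String × List String × Nat) (line : String) :
    List String × List String × Nat :=
  match s with
  | (before, after, mode) =>
    if mode = 0 then
      if PySem.Str.strip line == section_start then (before, after, 1)
      else (before ++ [line], after, 0)
    else if mode = 1 then
      if PySem.Str.strip line == section_end then (before, after, 2)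
      else (before, after, 1)
    else (before, after ++ [line], mode)

def remove_section (lines : List String) (section_start : String) (section_end : String) : List String × List String :=
  let r := lines.foldl (pvStepA section_start section_end) ([], [], 0)
  (r.1, r.2.1)

-- ===== PORT B =====
def remove_section_alt (lines : List String) (section_start : String) (section_end : String) : List String × List String :=
  match List.findIdx? (fun line => PySem.Str.strip line == section_start) lines with
  | none => (lines, [])
  | some i =>
    let before := lines.take i
    match List.findIdx? (fun line => PySem.Str.strip line == section_end) (lines.drop (i + 1)) with
    | none => (before, [])
    | some j => (before, (lines.drop (i + 1)).drop (j + 1))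

-- ===== PRECONDITION & SPEC =====
def Spec_remove_section (lines : List String) (section_start : String) (section_end : String) (out : List String × List String) : Prop := out = remove_section_alt lines section_start section_end
instance (lines : List String) (section_start : String) (section_end : String) (out : List String × List String) : Decidable (Spec_remove_section lines section_start section_end out) := by unfold Spec_remove_section; infer_instance

-- ===== CLAIM (what is proved, stated in full; the proofs are below) =====
def Claim_equal_remove_section : Prop := ∀ (lines : List String) (section_start : String) (section_end : String), Dom_remove_section lines section_start section_end → Spec_remove_section lines section_start section_end (remove_section lines section_start section_end)

-- ===== LEMMAS AND PROOFS =====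

theorem pvFoldA_mode2 (ss se : String) (lines b a : List String) :
    lines.foldl (pvStepA ss se) (b, a, 2) = (b, a ++ lines, 2) := by
  induction lines generalizing a with
  | nil => simp
  | cons l ls ih => simp [pvStepA, ih]

theorem pvFoldA_mode1 (ss se : String) (lines b a : List String) :
    lines.foldl (pvStepA ss se) (b, a, 1) =
      match List.findIdx? (fun line => PySem.Str.strip line == se) lines with
      | none => (b, a, 1)
      | some j => (b, a ++ lines.drop (j + 1), 2) := by
  induction lines with
  | nil => simp
  | cons l ls ih =>
    by_cases h : PySem.Str.strip l == se
    · simp [pvStepA, h, List.findIdx?_cons, pvFoldA_mode2]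
    · rw [List.foldl_cons, show pvStepA ss se (b, a, 1) l = (b, a, 1) from by
        simp [pvStepA, h], ih]
      cases hfs : List.findIdx? (fun line => PySem.Str.strip line == se) ls <;>
        simp [List.findIdx?_cons, h, hfs]

theorem pvFoldA_mode0 (ss se : String) (lines b a : List String) :
    (lines.foldl (pvStepA ss se) (b, a, 0)).1 = b ++ (remove_section_alt lines ss se).1 ∧
    (lines.foldl (pvStepA ss se) (b, a, 0)).2.1 = a ++ (remove_section_alt lines ss se).2 := by
  induction lines generalizing b with
  | nil => simp [remove_section_alt]
  | cons l ls ih =>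
    by_cases h : PySem.Str.strip l == ss
    · simp only [List.foldl_cons, pvStepA, h, reduceIte, remove_section_alt,
        List.findIdx?_cons, pvFoldA_mode1]
      cases hfs : List.findIdx? (fun line => PySem.Str.strip line == se) ls <;>
        simp [hfs]
    · simp only [List.foldl_cons, pvStepA, h, Bool.false_eq_true, reduceIte]
      rcases ih (b ++ [l]) with ⟨h1, h2⟩
      refine ⟨h1.trans ?_, h2.trans ?_⟩ <;>
      · simp only [remove_section_alt, List.findIdx?_cons, h, Bool.false_eq_true, reduceIte]
        cases hfs : List.findIdx? (fun line => PySem.Str.strip line == ss) ls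
        · simp
        · simp only [Option.map_some, List.take_succ_cons, List.drop_succ_cons]
          cases hfe : List.findIdx? (fun line => PySem.Str.strip line == se)
              (List.drop (_ + 1) ls) <;> simp

-- ===== VERDICT (by name: the statement is the Claim_ definition above) =====
theorem remove_section_spec : Claim_equal_remove_section := by
  intro lines ss se _
  unfold Spec_remove_section remove_section
  rcases pvFoldA_mode0 ss se lines [] [] with ⟨h1, h2⟩
  simp only [h1, h2, List.nil_append]
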